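-- pv_equiv track=rewrite | github.com/tmartin6/leoblue | ble_utils.py | swap_rows_two_by_two
-- ===== SOURCE A (Python) =====
-- def swap_rows_two_by_two(matrix):
--     """
--     Échange les lignes de la matrice deux par deux.
--     'matrix' est une liste de listes, où matrix[i] correspond à la i-ème ligne.
--     """
--     swapped_matrix = [row[:] for row in matrix]  # copie superficielle
--     num_rows = len(swapped_matrix)
--
--     # On boucle de 0 à num_rows-1 par pas de 2
--     # (car MATLAB: i=1:2:num_rows-1 => en Python on décale de -1 pour le 0-based)
--     for i in range(0, num_rows-1, 2):
--         # Échanger les lignes i et i+1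
--         tmp = swapped_matrix[i]
--         swapped_matrix[i] = swapped_matrix[i+1]
--         swapped_matrix[i+1] = tmp
--
--     return swapped_matrix
-- ===== SOURCE B (Python) =====
-- def swap_rows_two_by_two(matrix):
--     """Pairwise row swap by consuming the rows two at a time into a new list."""
--     result = []
--     it = iter(matrix)
--     for first in it:
--         second = next(it, None)
--         if second is None:
--             result.append(first[:])
--         else:
--             result.append(second[:])
--             result.append(first[:])
--     return result
-- ===== Notes on version B (the rewrite author's own statement) =====
-- stated objective: simpler
-- what changed: Instead of copying the whole matrix and then swapping adjacent rows in place by index over range(0,n-1,2), B consumes the rows pairwise from a single iterator and builds the output list directly (second row then first, leftover row kept).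
import Mathlib
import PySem

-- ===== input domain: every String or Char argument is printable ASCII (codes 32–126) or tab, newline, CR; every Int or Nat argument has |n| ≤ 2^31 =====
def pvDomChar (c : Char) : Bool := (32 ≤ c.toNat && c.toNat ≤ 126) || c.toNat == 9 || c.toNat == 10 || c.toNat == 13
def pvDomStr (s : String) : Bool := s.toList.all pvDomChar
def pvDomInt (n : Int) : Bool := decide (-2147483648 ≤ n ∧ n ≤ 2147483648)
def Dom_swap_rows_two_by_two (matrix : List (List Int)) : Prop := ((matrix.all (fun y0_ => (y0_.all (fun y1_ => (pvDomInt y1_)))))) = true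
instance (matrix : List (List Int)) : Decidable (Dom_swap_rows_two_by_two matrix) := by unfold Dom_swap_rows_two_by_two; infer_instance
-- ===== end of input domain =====

-- B replaces A's copy-then-swap-in-place index loop by a single pairwise pass building the output directly (objective: simpler).

-- ===== PORT A =====
-- one iteration of A's for-loop body: tmp = m[i]; m[i] = m[i+1]; m[i+1] = tmp
def pvStepA (m : List (List Int)) (i : Int) : List (List Int) :=
  let tmp := PySem.List.pyGetD m i []
  let m1 := PySem.List.pySetD m i (PySem.List.pyGetD m (i + 1) [])
  PySem.List.pySetD m1 (i + 1) tmp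

def swap_rows_two_by_two (matrix : List (List Int)) : List (List Int) :=
  let swapped := matrix.map (fun row => PySem.List.slice row none none)  -- row[:]
  let num_rows : Int := swapped.length
  (PySem.List.pyRange 0 (num_rows - 1) 2).foldl pvStepA swapped

-- ===== PORT B =====
-- B consumes the rows two at a time (the iterator loop with next(it, None)): structural recursion
def swap_rows_two_by_two_alt (matrix : List (List Int)) : List (List Int) :=
  match matrix with
  | [] => []
  | [first] => [PySem.List.slice first none none]          -- second is None: keep first[:]
  | first :: second :: rest =>
      PySem.List.slice second none none :: PySem.List.slice first none none ::
        swap_rows_two_by_two_alt rest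

-- ===== PRECONDITION & SPEC =====
def Spec_swap_rows_two_by_two (matrix : List (List Int)) (out : List (List Int)) : Prop := out = swap_rows_two_by_two_alt matrix
instance (matrix : List (List Int)) (out : List (List Int)) : Decidable (Spec_swap_rows_two_by_two matrix out) := by unfold Spec_swap_rows_two_by_two; infer_instance

-- ===== CLAIM (what is proved, stated in full; the proofs are below) =====
def Claim_equal_swap_rows_two_by_two : Prop := ∀ (matrix : List (List Int)), Dom_swap_rows_two_by_two matrix → Spec_swap_rows_two_by_two matrix (swap_rows_two_by_two matrix)

-- ===== LEMMAS AND PROOFS =====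

-- B's port computes just slice-copies arranged pairwise; slices are identities
theorem alt_simp (matrix : List (List Int)) :
    swap_rows_two_by_two_alt matrix =
      match matrix with
      | [] => []
      | [a] => [a]
      | a :: b :: t => b :: a :: swap_rows_two_by_two_alt t := by
  match matrix with
  | [] => rfl
  | [a] => simp [swap_rows_two_by_two_alt]
  | a :: b :: t => simp [swap_rows_two_by_two_alt]

-- one loop-body step of A at index 0 on a list with ≥ 2 elements swaps the head pair
theorem stepA_zero (a b : List Int) (t : List (List Int)) :
    pvStepA (a :: b :: t) 0 = b :: a :: t := by
  simp [pvStepA, PySem.List.pyGetD_of_nonneg, PySem.List.pySetD_of_nonneg]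

-- a step at index i+2 on x :: y :: t acts as the step at index i on t
theorem stepA_shift (x y : List Int) (t : List (List Int)) (i : Int) (hi : 0 ≤ i) :
    pvStepA (x :: y :: t) (i + 2) = x :: y :: pvStepA t i := by
  have h2 : (i + 2).toNat = i.toNat + 2 := by omega
  have h3 : (i + 2 + 1).toNat = (i + 1).toNat + 2 := by omega
  simp [pvStepA, PySem.List.pyGetD_of_nonneg, PySem.List.pySetD_of_nonneg, hi,
        (by omega : (0:Int) ≤ i + 1), (by omega : (0:Int) ≤ i + 2), (by omega : (0:Int) ≤ i + 2 + 1),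
        h2, h3, List.getD, List.set]

-- folding A's step over indices shifted by 2 leaves the first two rows alone
theorem foldA_shift (l : List Int) (hl : ∀ i ∈ l, 0 ≤ i) (x y : List Int) (t : List (List Int)) :
    (l.map (· + 2)).foldl pvStepA (x :: y :: t) = x :: y :: l.foldl pvStepA t := by
  induction l generalizing t with
  | nil => rfl
  | cons i l ih =>
      have hi : 0 ≤ i := hl i (by simp)
      simp only [List.map_cons, List.foldl_cons, stepA_shift x y t i hi]
      exact ih (fun j hj => hl j (by simp [hj])) _

-- A's index range decomposes head-first: range(0, b, 2) = [0] + [i+2 for i in range(0, b-2, 2)]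
theorem pyRange_two_cons (b : Int) (hb : 1 ≤ b) :
    PySem.List.pyRange 0 b 2 = 0 :: (PySem.List.pyRange 0 (b - 2) 2).map (· + 2) := by
  rw [PySem.List.pyRange_of_pos 0 b (by norm_num), PySem.List.pyRange_of_pos 0 (b - 2) (by norm_num)]
  have hcount : (if (0:Int) < b then ((b - 0 + 2 - 1) / 2).toNat else 0)
      = (if (0:Int) < b - 2 then ((b - 2 - 0 + 2 - 1) / 2).toNat else 0) + 1 := by
    split_ifs <;> omega
  rw [hcount, List.range_succ_eq_map]
  simp [List.map_map, Function.comp]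
  intro k _
  ring

-- the core equivalence, by pairwise recursion on the matrix
theorem foldA_eq_alt (m : List (List Int)) :
    (PySem.List.pyRange 0 ((m.length : Int) - 1) 2).foldl pvStepA m = swap_rows_two_by_two_alt m := by
  induction m using swap_rows_two_by_two_alt.induct with
  | case1 => rfl
  | case2 a => simp [swap_rows_two_by_two_alt, PySem.List.pyRange]
  | case3 a b t ih =>
      have hlen : ((a :: b :: t).length : Int) - 1 = (t.length : Int) + 1 := by
        simp
      rw [hlen, pyRange_two_cons _ (by omega)]
      have hnn : ∀ i ∈ PySem.List.pyRange 0 ((t.length : Int) + 1 - 2) 2, 0 ≤ i := by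
        intro i hi
        exact ((PySem.List.mem_pyRange_iff_of_pos (by norm_num) i).mp hi).1
      rw [List.foldl_cons, stepA_zero, foldA_shift _ hnn]
      rw [alt_simp (a :: b :: t)]
      have : (t.length : Int) + 1 - 2 = (t.length : Int) - 1 := by ring
      rw [this, ih]

-- ===== VERDICT (by name: the statement is the Claim_ definition above) =====
theorem swap_rows_two_by_two_spec : Claim_equal_swap_rows_two_by_two := by
  intro matrix _
  unfold Spec_swap_rows_two_by_two swap_rows_two_by_two
  simp only [PySem.List.slice_none_none, List.map_id']
  exact foldA_eq_alt matrix
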